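-- pv_equiv track=rewrite | github.com/vimalveerachamy/coding-interview-patterns | python3/Math and Geometry/maximum_collinear_points.py | max_points_from_focal_point
-- ===== SOURCE A (Python) =====
-- from collections import defaultdict
-- from math import gcd
-- from typing import List, Tuple
--
-- def max_points_from_focal_point(focal_point_index: int, points: List[List[int]]) -> int:
--     slopes_map = defaultdict(int)
--     max_points = 0
--     # For the current focal point, calculate the slope between it and
--     # every other point. This allows us to group points that share the
--     # same slope.
--     for j in range(len(points)):
--         if j != focal_point_index:
--             curr_slope = get_slope(points[focal_point_index], points[j])
--             slopes_map[curr_slope] += 1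
--             # Update the maximum count of collinear points for the
--             # current focal point.
--             max_points = max(max_points, slopes_map[curr_slope])
--     # Add 1 to the maximum count to include the focal point itself.
--     return max_points + 1
--
-- def get_slope(p1: List[int], p2: List[int]) -> Tuple[int, int]:
--     rise = p2[1] - p1[1]
--     run = p2[0] - p1[0]
--     # Handle vertical lines separately to avoid dividing by 0.
--     if run == 0:
--         return (1, 0)
--     # Simplify the slope to its reduced form.
--     gcd_val = gcd(rise, run)
--     return (rise // gcd_val, run // gcd_val)
-- ===== SOURCE B (Python) =====
-- from math import gcd
-- from typing import List, Tuple
--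
-- def get_slope(p1: List[int], p2: List[int]) -> Tuple[int, int]:
--     rise = p2[1] - p1[1]
--     run = p2[0] - p1[0]
--     if run == 0:
--         return (1, 0)
--     gcd_val = gcd(rise, run)
--     return (rise // gcd_val, run // gcd_val)
--
-- def max_points_from_focal_point(focal_point_index: int, points: List[List[int]]) -> int:
--     # Sort-then-scan: after sorting, equal slopes are adjacent, so the
--     # largest group is the longest run of equal consecutive slopes.
--     slopes = sorted(get_slope(points[focal_point_index], p)
--                     for j, p in enumerate(points) if j != focal_point_index)
--     best = 0
--     run = 0
--     prev = None
--     for s in slopes: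
--         run = run + 1 if s == prev else 1
--         prev = s
--         best = max(best, run)
--     return best + 1
-- ===== Notes on version B (the rewrite author's own statement) =====
-- stated objective: alternative
-- what changed: Replaces A's incremental slope-counter dict with a running maximum by a sort-then-scan: build the slope list once, sort it, and take the longest run of equal consecutive slopes in one linear scan.
import Mathlib
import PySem

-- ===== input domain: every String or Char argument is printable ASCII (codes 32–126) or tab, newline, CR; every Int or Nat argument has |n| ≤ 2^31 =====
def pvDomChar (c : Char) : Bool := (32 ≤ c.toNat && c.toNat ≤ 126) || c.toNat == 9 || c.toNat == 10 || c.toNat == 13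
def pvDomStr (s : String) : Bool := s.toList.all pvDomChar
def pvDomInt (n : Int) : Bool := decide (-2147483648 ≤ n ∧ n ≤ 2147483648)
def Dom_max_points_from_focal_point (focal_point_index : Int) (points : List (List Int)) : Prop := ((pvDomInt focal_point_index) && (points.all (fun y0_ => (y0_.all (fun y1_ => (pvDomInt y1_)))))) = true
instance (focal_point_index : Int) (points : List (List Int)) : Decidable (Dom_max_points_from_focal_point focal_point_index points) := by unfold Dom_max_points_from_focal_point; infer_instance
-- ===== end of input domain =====

-- B replaces A's incremental slope-counter dict (with a running maximum) by sort-then-scan: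
-- sort the slope list and take the longest run of equal consecutive slopes; alternative, not faster.


-- ===== PORT A =====
-- get_slope: indexing p[0]/p[1] is via pyGetD (default 0); inside Pre_ every accessed
-- point has length ≥ 2, so the default is never read and the port is exact there.
def get_slope (p1 p2 : List Int) : Int × Int :=
  let rise := PySem.List.pyGetD p2 1 0 - PySem.List.pyGetD p1 1 0
  let run := PySem.List.pyGetD p2 0 0 - PySem.List.pyGetD p1 0 0
  if run = 0 then (1, 0)
  else
    let gcd_val : Int := Int.gcd rise run
    (PySem.Int.floordiv rise gcd_val, PySem.Int.floordiv run gcd_val)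

-- points[focal_point_index]/points[j] via pyGetD (default []); exact inside Pre_.
def max_points_from_focal_point (focal_point_index : Int) (points : List (List Int)) : Int :=
  let res := (PySem.List.pyRange 0 (PySem.List.len points)).foldl
    (fun (st : PySem.Dict (Int × Int) Int × Int) j =>
      if j ≠ focal_point_index then
        let curr_slope := get_slope (PySem.List.pyGetD points focal_point_index [])
                                    (PySem.List.pyGetD points j [])
        let m := st.1.insert curr_slope (st.1.getD curr_slope 0 + 1)
        (m, max st.2 (m.getD curr_slope 0))
      else st)
    (PySem.Dict.empty, 0)
  res.2 + 1

-- ===== PORT B =====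
def get_slope_alt (p1 p2 : List Int) : Int × Int :=
  let rise := PySem.List.pyGetD p2 1 0 - PySem.List.pyGetD p1 1 0
  let run := PySem.List.pyGetD p2 0 0 - PySem.List.pyGetD p1 0 0
  if run = 0 then (1, 0)
  else
    let gcd_val : Int := Int.gcd rise run
    (PySem.Int.floordiv rise gcd_val, PySem.Int.floordiv run gcd_val)

-- sorted(tuples) is the tuple-key sort PySem.List.sorted2; the for-loop is a foldl over
-- the state (best, run, prev), with prev : Option (Int × Int) for Python's None start.
def max_points_from_focal_point_alt (focal_point_index : Int) (points : List (List Int)) : Int :=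
  let slopes := PySem.List.sorted2
    (((PySem.List.enumerate points).filter (fun jp => decide (jp.1 ≠ focal_point_index))).map
      (fun jp => get_slope_alt (PySem.List.pyGetD points focal_point_index []) jp.2))
    (fun s => s.1) (fun s => s.2)
  let res := slopes.foldl
    (fun (st : Int × Int × Option (Int × Int)) s =>
      let run := if some s = st.2.2 then st.2.1 + 1 else 1
      (max st.1 run, run, some s))
    (0, 0, none)
  res.1 + 1

-- ===== PRECONDITION & SPEC =====
-- Exactly where Python A returns: out-of-range focal_point_index (with nonempty points)
-- and accessed points of length < 2 raise IndexError; with a single point and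
-- focal_point_index = 0 nothing is ever indexed into, so any point shape is admitted.
def Pre_max_points_from_focal_point (focal_point_index : Int) (points : List (List Int)) : Prop :=
  points = [] ∨
    (-(points.length : Int) ≤ focal_point_index ∧ focal_point_index < (points.length : Int) ∧
      ((points.length = 1 ∧ focal_point_index = 0) ∨ ∀ p ∈ points, 2 ≤ p.length))
instance (focal_point_index : Int) (points : List (List Int)) : Decidable (Pre_max_points_from_focal_point focal_point_index points) := by unfold Pre_max_points_from_focal_point; infer_instance

def pvWitness_max_points_from_focal_point : Int × List (List Int) := (0, [[0,0],[1,1],[2,2],[0,5]])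

def Spec_max_points_from_focal_point (focal_point_index : Int) (points : List (List Int)) (out : Int) : Prop := out = max_points_from_focal_point_alt focal_point_index points
instance (focal_point_index : Int) (points : List (List Int)) (out : Int) : Decidable (Spec_max_points_from_focal_point focal_point_index points out) := by unfold Spec_max_points_from_focal_point; infer_instance

-- ===== CLAIM (what is proved, stated in full; the proofs are below) =====
def Claim_equal_max_points_from_focal_point : Prop := ∀ (focal_point_index : Int) (points : List (List Int)), Dom_max_points_from_focal_point focal_point_index points → Pre_max_points_from_focal_point focal_point_index points → Spec_max_points_from_focal_point focal_point_index points (max_points_from_focal_point focal_point_index points)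

-- ===== LEMMAS AND PROOFS =====

-- The maximum slope multiplicity: the quantity both programs compute before the +1.
def pvMaxCnt (L : List (Int × Int)) : Int :=
  (L.map (fun s => (L.count s : Int))).foldl max 0

theorem pvMaxCnt_nonneg (L : List (Int × Int)) : 0 ≤ pvMaxCnt L :=
  (PySem.List.le_foldl_max _ 0).1

theorem pvMaxCnt_append_singleton (P : List (Int × Int)) (x : Int × Int) :
    pvMaxCnt (P ++ [x]) = max (pvMaxCnt P) ((P.count x : Int) + 1) := by
  have hcntx : ((P ++ [x]).count x : Int) = (P.count x : Int) + 1 := by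
    simp [List.count_append]
  apply le_antisymm
  · rcases PySem.List.foldl_max_mem ((P ++ [x]).map (fun s => ((P ++ [x]).count s : Int))) 0 with h0 | hmem
    · unfold pvMaxCnt; rw [h0]
      exact le_trans (pvMaxCnt_nonneg P) (le_max_left _ _)
    · obtain ⟨s, hs, hval⟩ := List.mem_map.mp hmem
      show pvMaxCnt (P ++ [x]) ≤ _
      unfold pvMaxCnt; rw [← hval]
      by_cases hsx : s = x
      · subst hsx; rw [hcntx]; exact le_max_right _ _
      · have hsP : s ∈ P := by
          rcases List.mem_append.mp hs with h | h
          · exact h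
          · simp at h; exact absurd h hsx
        have h1 : ((P ++ [x]).count s : Int) = (P.count s : Int) := by
          simp [List.count_append, Ne.symm hsx]
        rw [h1]
        have h2 : (P.count s : Int) ≤ pvMaxCnt P :=
          (PySem.List.le_foldl_max _ 0).2 _ (List.mem_map.mpr ⟨s, hsP, rfl⟩)
        exact le_trans h2 (le_max_left _ _)
  · apply max_le
    · rcases PySem.List.foldl_max_mem (P.map (fun s => (P.count s : Int))) 0 with h0 | hmem
      · show pvMaxCnt P ≤ _
        unfold pvMaxCnt; rw [h0]; exact pvMaxCnt_nonneg _
      · obtain ⟨s, hs, hval⟩ := List.mem_map.mp hmem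
        show pvMaxCnt P ≤ pvMaxCnt (P ++ [x])
        unfold pvMaxCnt; rw [← hval]
        have hle : (P.count s : Int) ≤ ((P ++ [x]).count s : Int) := by
          simp [List.count_append]
        refine le_trans hle ?_
        exact (PySem.List.le_foldl_max _ 0).2 _
          (List.mem_map.mpr ⟨s, List.mem_append.mpr (Or.inl hs), rfl⟩)
    · have hx : x ∈ P ++ [x] := List.mem_append.mpr (Or.inr (List.mem_singleton.mpr rfl))
      have := (PySem.List.le_foldl_max ((P ++ [x]).map (fun s => ((P ++ [x]).count s : Int))) 0).2
        _ (List.mem_map.mpr ⟨x, hx, rfl⟩)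
      unfold pvMaxCnt
      rw [hcntx] at this; exact this

-- pvMaxCnt only depends on the multiset of slopes (needed to pass through the sort).
theorem pvMaxCnt_perm {M L : List (Int × Int)} (h : M.Perm L) : pvMaxCnt M = pvMaxCnt L := by
  unfold pvMaxCnt
  have h1 : M.map (fun s => (M.count s : Int)) = M.map (fun s => (L.count s : Int)) :=
    List.map_congr_left (fun s _ => by rw [h.count_eq])
  rw [h1]
  exact (h.map (fun s => (L.count s : Int))).foldl_eq 0

-- A's loop over the slope list.
def pvFoldA (L : List (Int × Int)) (init : PySem.Dict (Int × Int) Int × Int) :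
    PySem.Dict (Int × Int) Int × Int :=
  L.foldl (fun st s =>
    let m := st.1.insert s (st.1.getD s 0 + 1)
    (m, max st.2 (m.getD s 0))) init

theorem pvFoldA_fst (L : List (Int × Int)) (init : PySem.Dict (Int × Int) Int × Int) :
    (pvFoldA L init).1 = L.foldl (fun d s => d.insert s (d.getD s 0 + 1)) init.1 := by
  induction L generalizing init with
  | nil => rfl
  | cons x t ih => simpa [pvFoldA] using ih _

theorem pvFoldA_snd (L : List (Int × Int)) :
    (pvFoldA L (PySem.Dict.empty, 0)).2 = pvMaxCnt L := by
  induction L using List.reverseRecOn with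
  | nil => rfl
  | append_singleton P x ih =>
    rw [pvMaxCnt_append_singleton, ← ih]
    unfold pvFoldA
    rw [List.foldl_append]
    simp only [List.foldl_cons, List.foldl_nil]
    have hfst := pvFoldA_fst P (PySem.Dict.empty, 0)
    unfold pvFoldA at hfst
    rw [PySem.Dict.getD_insert_self, hfst,
      PySem.Dict.getD_foldl_insert_add_one, PySem.Dict.getD_empty]
    simp

-- B's sort: the lexicographic key, as a LinearOrder.
def pvKey (p : Int × Int) : Lex (Int × Int) := toLex p

theorem pvKey_inj : Function.Injective pvKey := toLex.injective

-- sorted2's tuple comparator IS the strict lexicographic order on pvKey.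
theorem pvSorted2_pairwise (xs : List (Int × Int)) :
    (PySem.List.sorted2 xs (fun s => s.1) (fun s => s.2) false).Pairwise
      (fun a b => pvKey a ≤ pvKey b) := by
  have hcmp : (fun (a b : Int × Int) =>
      (decide (a.1 < b.1) || (!decide (b.1 < a.1) && decide (a.2 < b.2))))
      = fun a b => decide (pvKey a < pvKey b) := by
    funext a b
    have : (pvKey a < pvKey b) ↔ (a.1 < b.1 ∨ a.1 = b.1 ∧ a.2 < b.2) :=
      Prod.Lex.toLex_lt_toLex
    by_cases h1 : a.1 < b.1 <;> by_cases h2 : b.1 < a.1 <;> by_cases h3 : a.2 < b.2 <;>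
      simp [h1, h2, h3, this] <;> omega
  show (List.foldl (fun acc x => PySem.List.insertBy _ x acc) [] xs).Pairwise _
  rw [hcmp]
  have : ∀ (acc : List (Int × Int)), acc.Pairwise (fun a b => pvKey a ≤ pvKey b) →
      (List.foldl (fun acc x => PySem.List.insertBy
        (fun a b => decide (pvKey a < pvKey b)) x acc) acc xs).Pairwise
        (fun a b => pvKey a ≤ pvKey b) := by
    induction xs with
    | nil => intro acc h; exact h
    | cons x t ih =>
      intro acc h
      exact ih _ (PySem.List.insertBy_pairwise_le pvKey x acc h)
  exact this [] List.Pairwise.nil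

-- In a ≤-sorted list P ++ [x], an x occurring in P must be P's last element.
theorem pvMem_sorted_last {P : List (Int × Int)} {x y : Int × Int}
    (h : (P ++ [x]).Pairwise (fun a b => pvKey a ≤ pvKey b))
    (hy : P.getLast? = some y) (hne : x ≠ y) : x ∉ P := by
  intro hxP
  obtain ⟨C, D, rfl⟩ := List.append_of_mem hxP
  have h' := h
  rw [List.pairwise_append] at h'
  have hP : (C ++ x :: D).Pairwise (fun a b => pvKey a ≤ pvKey b) := h'.1
  have hup : ∀ a ∈ C ++ x :: D, pvKey a ≤ pvKey x := by
    intro a ha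
    exact h'.2.2 a ha x (List.mem_singleton.mpr rfl)
  have hDx : ∀ d ∈ D, d = x := by
    intro d hd
    have h1 : pvKey x ≤ pvKey d := by
      rw [List.pairwise_append] at hP
      exact (List.pairwise_cons.mp hP.2.1).1 d hd
    have h2 : pvKey d ≤ pvKey x :=
      hup d (List.mem_append.mpr (Or.inr (List.mem_cons_of_mem _ hd)))
    exact pvKey_inj (le_antisymm h2 h1)
  cases hD : D.getLast? with
  | none =>
    rw [List.getLast?_eq_none_iff.mp hD] at hy
    rw [List.getLast?_concat] at hy
    exact hne (Option.some.inj hy)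
  | some d =>
    obtain ⟨ys, rfl⟩ := List.getLast?_eq_some_iff.mp hD
    have hdD : d ∈ ys ++ [d] := by simp
    have hCL : (C ++ x :: (ys ++ [d])).getLast? = some d := by
      rw [show C ++ x :: (ys ++ [d]) = (C ++ x :: ys) ++ [d] by simp, List.getLast?_concat]
    rw [hCL] at hy
    exact hne (((hDx d hdD).symm).trans (Option.some.inj hy))

-- B's scan step, and its invariant over a ≤-sorted list:
-- the state is (best run so far = pvMaxCnt, current run = count of the last element, last element).
def pvStep (st : Int × Int × Option (Int × Int)) (s : Int × Int) : Int × Int × Option (Int × Int) :=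
  let run := if some s = st.2.2 then st.2.1 + 1 else 1
  (max st.1 run, run, some s)

theorem pvScan_inv (M : List (Int × Int))
    (h : M.Pairwise (fun a b => pvKey a ≤ pvKey b)) :
    M.foldl pvStep (0, 0, none) =
      (match M.getLast? with
        | none => (0, 0, none)
        | some y => (pvMaxCnt M, (M.count y : Int), some y)) := by
  induction M using List.reverseRecOn with
  | nil => rfl
  | append_singleton P x ih =>
    have hP : P.Pairwise (fun a b => pvKey a ≤ pvKey b) :=
      List.Pairwise.sublist (List.sublist_append_left P [x]) h
    rw [List.foldl_append, ih hP, List.getLast?_concat]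
    cases hPl : P.getLast? with
    | none =>
      have hPnil : P = [] := List.getLast?_eq_none_iff.mp hPl
      subst hPnil
      simp [pvStep, pvMaxCnt, List.count_cons]
    | some y =>
      have hPne : P ≠ [] := by
        intro hc; subst hc; simp at hPl
      by_cases hxy : x = y
      · subst hxy
        simp only [List.foldl_cons, List.foldl_nil, pvStep]
        have hcnt : ((P ++ [x]).count x : Int) = (P.count x : Int) + 1 := by
          simp [List.count_append]
        rw [pvMaxCnt_append_singleton, hcnt]
        simp
      · simp only [List.foldl_cons, List.foldl_nil, pvStep,
          if_neg (fun hc => hxy (Option.some.inj hc))]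
        have hnotin : x ∉ P := pvMem_sorted_last h hPl hxy
        have hcnt0 : P.count x = 0 := List.count_eq_zero.mpr hnotin
        have hcnt : ((P ++ [x]).count x : Int) = 1 := by
          simp [List.count_append, hcnt0]
        rw [pvMaxCnt_append_singleton, hcnt0, hcnt]
        simp

-- The scan's best-run accumulator is pvMaxCnt of the scanned list.
theorem pvScan_fst (M : List (Int × Int))
    (h : M.Pairwise (fun a b => pvKey a ≤ pvKey b)) :
    (M.foldl pvStep (0, 0, none)).1 = pvMaxCnt M := by
  rw [pvScan_inv M h]
  cases hM : M.getLast? with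
  | none =>
    rw [List.getLast?_eq_none_iff.mp hM]; rfl
  | some y => rfl

-- ===== VERDICT (by name: the statement is the Claim_ definition above) =====
theorem get_slope_alt_eq : get_slope_alt = get_slope := rfl

theorem max_points_from_focal_point_spec : Claim_equal_max_points_from_focal_point := by
  intro f pts _hdom _hpre
  unfold Spec_max_points_from_focal_point
  unfold max_points_from_focal_point max_points_from_focal_point_alt
  -- name the unsorted slope list
  set L := (((PySem.List.enumerate pts).filter (fun jp => decide (jp.1 ≠ f))).map
      (fun jp => get_slope_alt (PySem.List.pyGetD pts f []) jp.2)) with hL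
  -- B's side: sort-then-scan computes pvMaxCnt L
  set M := PySem.List.sorted2 L (fun s => s.1) (fun s => s.2) false with hM
  have hBfold : (M.foldl
      (fun (st : Int × Int × Option (Int × Int)) s =>
        let run := if some s = st.2.2 then st.2.1 + 1 else 1
        (max st.1 run, run, some s))
      (0, 0, none)).1 = pvMaxCnt M := pvScan_fst M (pvSorted2_pairwise L)
  have hB : (M.foldl
      (fun (st : Int × Int × Option (Int × Int)) s =>
        let run := if some s = st.2.2 then st.2.1 + 1 else 1
        (max st.1 run, run, some s))
      (0, 0, none)).1 = pvMaxCnt L := by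
    rw [hBfold]
    exact pvMaxCnt_perm (PySem.List.sorted2_perm L _ _ false)
  -- A's side: the index loop is the slope-list loop, whose running max is pvMaxCnt L
  have hEnum : (PySem.List.enumerate pts).foldl
      (fun (st : PySem.Dict (Int × Int) Int × Int) (jp : Int × List Int) =>
        if jp.1 ≠ f then
          let curr_slope := get_slope (PySem.List.pyGetD pts f []) jp.2
          let m := st.1.insert curr_slope (st.1.getD curr_slope 0 + 1)
          (m, max st.2 (m.getD curr_slope 0))
        else st)
      (PySem.Dict.empty, 0)
    = (PySem.List.pyRange 0 (PySem.List.len pts)).foldl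
      (fun (st : PySem.Dict (Int × Int) Int × Int) j =>
        if j ≠ f then
          let curr_slope := get_slope (PySem.List.pyGetD pts f []) (PySem.List.pyGetD pts j [])
          let m := st.1.insert curr_slope (st.1.getD curr_slope 0 + 1)
          (m, max st.2 (m.getD curr_slope 0))
        else st)
      (PySem.Dict.empty, 0) := by
    rw [PySem.List.enumerate_eq_map_pyRange pts [], List.foldl_map]
  have hA : ∀ (l : List (Int × List Int)) (init : PySem.Dict (Int × Int) Int × Int),
      l.foldl
        (fun (st : PySem.Dict (Int × Int) Int × Int) (jp : Int × List Int) =>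
          if jp.1 ≠ f then
            let curr_slope := get_slope (PySem.List.pyGetD pts f []) jp.2
            let m := st.1.insert curr_slope (st.1.getD curr_slope 0 + 1)
            (m, max st.2 (m.getD curr_slope 0))
          else st) init
    = pvFoldA ((l.filter (fun jp => decide (jp.1 ≠ f))).map
        (fun jp => get_slope_alt (PySem.List.pyGetD pts f []) jp.2)) init := by
    intro l
    induction l with
    | nil => intro init; rfl
    | cons x t ih =>
      intro init
      rw [List.foldl_cons, List.filter_cons]
      by_cases hx : x.1 ≠ f
      · rw [if_pos hx, if_pos (by simpa using hx), List.map_cons]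
        simp only [pvFoldA, List.foldl_cons, get_slope_alt_eq]
        exact ih _
      · rw [if_neg hx, if_neg (by simpa using hx)]
        exact ih _
  show ((PySem.List.pyRange 0 (PySem.List.len pts)).foldl _ (PySem.Dict.empty, 0)).2 + 1 = _
  rw [← hEnum, hA, pvFoldA_snd, ← hL]
  show pvMaxCnt L + 1 =
    (M.foldl
      (fun (st : Int × Int × Option (Int × Int)) s =>
        let run := if some s = st.2.2 then st.2.1 + 1 else 1
        (max st.1 run, run, some s))
      (0, 0, none)).1 + 1
  rw [hB]
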